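-- pv_equiv track=rewrite | github.com/azwpayne/crypt | src/crypt/encrypt/symmetric_encrypt/block_cipher/rail_fence_cipher.py | brute_force_decrypt
-- ===== SOURCE A (Python) =====
-- def decrypt(text: str, rails: int) -> str:
--   """
--   使用栅栏密码解密文本
--
--   参数:
--       text: 待解密的字符串
--       rails: 栅栏数
--
--   返回:
--       解密后的字符串
--   """
--   if rails < 1:
--     msg = "栅栏数必须大于等于1"
--     raise ValueError(msg)
--
--   if rails == 1:
--     return text
--
--   if len(text) <= rails:
--     return text
--
--   n = len(text)
--
--   # 计算每行的长度
--   # 一个完整的周期是 2*(rails-1) 个字符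
--   cycle = 2 * (rails - 1)
--
--   # 计算每行应该有多少个字符
--   row_lengths = [0] * rails
--
--   for i in range(n):
--     pos = i % cycle
--     if pos >= rails:
--       pos = cycle - pos
--     row_lengths[pos] += 1
--
--   # 分割文本到各行
--   fence = []
--   idx = 0
--   for length in row_lengths:
--     fence.append(list(text[idx : idx + length]))
--     idx += length
--
--   # 按锯齿形读取
--   result = []
--   rail = 0
--   direction = 1
--
--   for _ in range(n):
--     result.append(fence[rail].pop(0))
--     rail += direction
--
--     if rail == 0 or rail == rails - 1:
--       direction *= -1
--
--   return "".join(result)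
--
-- def _try_decrypt(text: str, rails: int) -> str | None:
--   """Attempt to decrypt with a given rail count; return None on failure."""
--   try:
--     return decrypt(text, rails)
--   except ValueError:
--     return None
--
-- def brute_force_decrypt(text: str, max_rails: int = 10) -> dict[int, str]:
--   """
--   暴力破解栅栏密码
--
--   尝试所有可能的栅栏数
--
--   参数:
--       text: 待解密的字符串
--       max_rails: 最大尝试的栅栏数
--
--   返回:
--       包含所有可能解密结果的字典
--   """
--   results = {}
--   for rails in range(2, min(max_rails + 1, len(text) + 1)):
--     result = _try_decrypt(text, rails)
--     if result is None:
--       break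
--     results[rails] = result
--   return results
-- ===== SOURCE B (Python) =====
-- def _fence_decrypt(text, rails):
--     """Decrypt one rail count by inverting the zigzag permutation directly."""
--     n = len(text)
--     if n <= rails:
--         return text
--     cycle = 2 * (rails - 1)
--     pattern = [min(i % cycle, cycle - i % cycle) for i in range(n)]
--     rows = [[] for _ in range(rails)]
--     for i in range(n):
--         rows[pattern[i]].append(i)
--     # positions of the plaintext in the order the cipher text lists them
--     order = [i for row in rows for i in row]
--     plain = [''] * n
--     for ch, pos in zip(text, order):
--         plain[pos] = ch
--     return ''.join(plain)
--
--
-- def brute_force_decrypt(text, max_rails=10):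
--     n = len(text)
--     return {rails: _fence_decrypt(text, rails)
--             for rails in range(2, min(max_rails, n) + 1)}
-- ===== Notes on version B (the rewrite author's own statement) =====
-- stated objective: alternative
-- what changed: Each rail count is decrypted by computing the zigzag rail pattern in closed form, listing plaintext positions grouped by rail (the encryption read order) and scattering the cipher characters back through that permutation, instead of A's per-rail length counting, row splitting and queue-popping along a stateful zigzag walk; the try/except-break loop disappears since no rail count in range can fail.
import Mathlib
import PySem

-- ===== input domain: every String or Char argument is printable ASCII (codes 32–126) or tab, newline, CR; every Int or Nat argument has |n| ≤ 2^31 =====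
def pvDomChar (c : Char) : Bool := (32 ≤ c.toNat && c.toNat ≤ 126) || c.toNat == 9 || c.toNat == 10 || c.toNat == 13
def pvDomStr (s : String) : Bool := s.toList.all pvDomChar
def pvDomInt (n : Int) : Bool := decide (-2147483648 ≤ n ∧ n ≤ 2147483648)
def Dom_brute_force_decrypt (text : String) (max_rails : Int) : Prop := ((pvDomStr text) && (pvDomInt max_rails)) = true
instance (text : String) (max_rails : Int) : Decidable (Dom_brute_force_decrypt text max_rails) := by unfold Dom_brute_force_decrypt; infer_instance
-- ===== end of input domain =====

-- B re-implements each rail-count decryption by inverting the zigzag permutation directly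
-- (closed-form pattern, grouped position list, scatter) instead of A's row-length counting,
-- row splitting and queue-popping zigzag walk; same observable behaviour, similar cost.

-- ===== PORT A =====
-- A-side helper: body of the zigzag read loop of decrypt (one iteration of 'for _ in range(n)')
def pvReadStep (rails : Int) (s : Option (List Char × List (List Char) × Int × Int)) :
    Option (List Char × List (List Char) × Int × Int) :=
  match s with
  | none => none
  | some (result, fence, rail, direction) =>
    match PySem.List.pyGet? fence rail with
    | none => none
    | some row =>
      match PySem.List.pop? row 0 with
      | none => none
      | some (c, row') =>
        let fence' := PySem.List.pySetD fence rail row'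
        let rail' := rail + direction
        let direction' := if rail' = 0 ∨ rail' = rails - 1 then -direction else direction
        some (result ++ [c], fence', rail', direction')

-- decrypt: none = exception (ValueError for rails < 1; the Option-state read loop would
-- give none on an IndexError, which in fact never happens on the calls made below).
def pvDecryptA (text : String) (rails : Int) : Option String :=
  if rails < 1 then none
  else if rails = 1 then some text
  else if PySem.Str.len text ≤ rails then some text
  else
    let cs := text.toList
    let n : Int := PySem.Str.len text
    let cycle : Int := 2 * (rails - 1)
    let row_lengths : List Int := (PySem.List.pyRange 0 n 1).foldl
      (fun rl i =>
        let pos := PySem.Int.mod i cycle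
        let pos := if rails ≤ pos then cycle - pos else pos
        PySem.List.pySetD rl pos (PySem.List.pyGetD rl pos 0 + 1))
      (PySem.List.pyRepeat [(0 : Int)] rails)
    let fp := row_lengths.foldl
      (fun (p : List (List Char) × Int) len =>
        (p.1 ++ [PySem.List.slice cs (some p.2) (some (p.2 + len))], p.2 + len))
      ([], 0)
    let st := (PySem.List.pyRange 0 n 1).foldl
      (fun s _ => pvReadStep rails s)
      (some ([], fp.1, 0, 1))
    st.map (fun s => String.ofList s.1)

def brute_force_decrypt (text : String) (max_rails : Int) : List (Int × String) :=
  let st := (PySem.List.pyRange 2 (min (max_rails + 1) (PySem.Str.len text + 1)) 1).foldl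
    (fun (p : PySem.Dict Int String × Bool) rails =>
      if p.2 then p
      else
        match pvDecryptA text rails with
        | none => (p.1, true)
        | some r => (p.1.insert rails r, false))
    (PySem.Dict.empty, false)
  st.1.items

-- ===== PORT B =====
def pvFenceDecrypt (text : String) (rails : Int) : String :=
  let n : Int := PySem.Str.len text
  if n ≤ rails then text
  else
    let cs := text.toList
    let cycle : Int := 2 * (rails - 1)
    let pattern : List Int := (PySem.List.pyRange 0 n 1).map
      (fun i => min (PySem.Int.mod i cycle) (cycle - PySem.Int.mod i cycle))
    let rows : List (List Int) := (PySem.List.pyRange 0 n 1).foldl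
      (fun rows i => PySem.List.pySetD rows (PySem.List.pyGetD pattern i 0)
        (PySem.List.pyGetD rows (PySem.List.pyGetD pattern i 0) [] ++ [i]))
      ((PySem.List.pyRange 0 rails 1).map (fun _ => []))
    let order : List Int := rows.flatMap (fun row => row)
    let plain : List String := (cs.zip order).foldl
      (fun pl p => PySem.List.pySetD pl p.2 (String.singleton p.1))
      (PySem.List.pyRepeat [""] n)
    PySem.Str.join "" plain

def brute_force_decrypt_alt (text : String) (max_rails : Int) : List (Int × String) :=
  (PySem.List.pyRange 2 (min max_rails (PySem.Str.len text) + 1) 1).map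
    (fun rails => (rails, pvFenceDecrypt text rails))

-- ===== PRECONDITION & SPEC =====
def Spec_brute_force_decrypt (text : String) (max_rails : Int) (out : List (Int × String)) : Prop := out = brute_force_decrypt_alt text max_rails
instance (text : String) (max_rails : Int) (out : List (Int × String)) : Decidable (Spec_brute_force_decrypt text max_rails out) := by unfold Spec_brute_force_decrypt; infer_instance

-- ===== CLAIM (what is proved, stated in full; the proofs are below) =====
def Claim_equal_brute_force_decrypt : Prop := ∀ (text : String) (max_rails : Int), Dom_brute_force_decrypt text max_rails → Spec_brute_force_decrypt text max_rails (brute_force_decrypt text max_rails)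

-- ===== LEMMAS AND PROOFS =====

-- zigzag rail of position i, for a cycle length c
def zPat (c i : Nat) : Nat := min (i % c) (c - i % c)
-- positions (in increasing order) lying on rail r
def zGroup (c n r : Nat) : List Nat := (List.range n).filter (fun i => zPat c i = r)
def zCnt (c n r : Nat) : Nat := (zGroup c n r).length
def zOff (c n r : Nat) : Nat := ((List.range n).filter (fun i => zPat c i < r)).length
def zBefore (c i : Nat) : Nat := ((List.range i).filter (fun j => zPat c j = zPat c i)).length
-- index in the cipher text that ends up at plaintext position i
def zSig (c n i : Nat) : Nat := zOff c n (zPat c i) + zBefore c i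
-- plaintext positions in cipher (row-major) order
def zOrder (c n R : Nat) : List Nat := (List.range R).flatMap (zGroup c n)

lemma zPat_lt {R : Nat} (h2 : 2 ≤ R) (i : Nat) : zPat (2 * (R - 1)) i < R := by
  unfold zPat
  have h : i % (2 * (R - 1)) < 2 * (R - 1) := Nat.mod_lt _ (by omega)
  omega

lemma filter_le_split (l : List Nat) (f : Nat → Nat) (r : Nat) :
    (l.filter (fun i => f i ≤ r)).length
      = (l.filter (fun i => f i < r)).length + (l.filter (fun i => f i = r)).length := by
  induction l with
  | nil => simp
  | cons x xs ih =>
    by_cases h1 : f x ≤ r <;> by_cases h2 : f x < r <;> by_cases h3 : f x = r <;>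
      simp [h1, h2, h3, ih] <;> omega

lemma zOff_succ (c n r : Nat) : zOff c n (r + 1) = zOff c n r + zCnt c n r := by
  simpa [zOff, zCnt, zGroup, Nat.lt_succ_iff] using filter_le_split (List.range n) (zPat c) r

lemma zOff_zero (c n : Nat) : zOff c n 0 = 0 := by simp [zOff]

lemma zOff_cnt_le (c n r : Nat) : zOff c n r + zCnt c n r ≤ n := by
  rw [← zOff_succ]
  calc zOff c n (r+1) ≤ (List.range n).length := List.length_filter_le _ _
    _ = n := List.length_range

lemma zOff_top {c n R : Nat} (h2 : 2 ≤ R) (hc : c = 2 * (R - 1)) : zOff c n R = n := by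
  unfold zOff
  rw [List.filter_eq_self.2, List.length_range]
  intro i _
  simpa using (hc ▸ zPat_lt h2 i)

lemma zGroup_split {c n : Nat} (i : Nat) (hi : i < n) :
    zGroup c n (zPat c i)
      = (List.range i).filter (fun j => zPat c j = zPat c i)
        ++ i :: ((List.range (n - i - 1)).map (fun k => i + 1 + k)).filter
            (fun j => zPat c j = zPat c i) := by
  have hn : n = i + 1 + (n - i - 1) := by omega
  conv_lhs => rw [zGroup, hn]
  rw [List.range_add, List.range_add, List.filter_append, List.filter_append]
  simp [List.range_one, Nat.add_assoc]

lemma zBefore_lt_zCnt {c n : Nat} (i : Nat) (hi : i < n) :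
    zBefore c i < zCnt c n (zPat c i) := by
  rw [zCnt, zGroup_split i hi]
  simp [zBefore]

lemma zGroup_getElem {c n : Nat} (i : Nat) (hi : i < n)
    (h : zBefore c i < (zGroup c n (zPat c i)).length) :
    (zGroup c n (zPat c i))[zBefore c i] = i := by
  have hsplit := zGroup_split (c := c) (n := n) i hi
  have hlen : ((List.range i).filter (fun j => zPat c j = zPat c i)).length = zBefore c i := rfl
  rw [List.getElem_of_eq hsplit]
  rw [List.getElem_append_right hlen.le]
  simp [hlen]

lemma zOrder_length_eq_off (c n R : Nat) : (zOrder c n R).length = zOff c n R := by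
  induction R with
  | zero => simp [zOrder, zOff_zero]
  | succ r ih =>
    rw [zOrder, List.range_succ, List.flatMap_append, List.length_append]
    rw [zOff_succ]
    simp [zOrder] at ih
    simp [ih, zCnt]

lemma zOrder_getElem {c n R : Nat} (h2 : 2 ≤ R) (hc : c = 2 * (R - 1)) (i : Nat) (hi : i < n) :
    ∃ (h : zSig c n i < (zOrder c n R).length), (zOrder c n R)[zSig c n i] = i := by
  have hp : zPat c i < R := hc ▸ zPat_lt h2 i
  have hRsplit : R = zPat c i + 1 + (R - zPat c i - 1) := by omega
  have horder : zOrder c n R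
      = zOrder c n (zPat c i) ++ zGroup c n (zPat c i)
        ++ ((List.range (R - zPat c i - 1)).map (fun k => zPat c i + 1 + k)).flatMap (zGroup c n) := by
    conv_lhs => rw [zOrder, hRsplit]
    rw [List.range_add, List.range_add, List.flatMap_append, List.flatMap_append]
    simp [zOrder, List.range_one, Nat.add_assoc]
  have hb : zBefore c i < zCnt c n (zPat c i) := zBefore_lt_zCnt i hi
  have hlen1 : (zOrder c n (zPat c i)).length = zOff c n (zPat c i) := zOrder_length_eq_off _ _ _
  have hlt : zSig c n i < (zOrder c n (zPat c i) ++ zGroup c n (zPat c i)).length := by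
    rw [List.length_append, hlen1]
    exact Nat.add_lt_add_left hb _
  have hlen : zSig c n i < (zOrder c n R).length := by
    rw [horder]
    simp only [List.length_append]
    rw [List.length_append] at hlt
    omega
  refine ⟨hlen, ?_⟩
  rw [List.getElem_of_eq horder]
  rw [List.getElem_append_left hlt]
  rw [List.getElem_append_right (show (zOrder c n (zPat c i)).length ≤ zSig c n i by
    rw [hlen1]; exact Nat.le_add_right _ _)]
  have hidx : zSig c n i - (zOrder c n (zPat c i)).length = zBefore c i := by
    rw [hlen1]; simp [zSig]
  simp only [hidx]
  exact zGroup_getElem i hi hb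

lemma zOrder_nodup (c n R : Nat) : (zOrder c n R).Nodup := by
  rw [zOrder, List.nodup_flatMap]
  constructor
  · intro r _
    exact (List.nodup_range).filter _
  · refine List.Pairwise.imp ?_ (List.pairwise_lt_range (n := R))
    intro a b hab
    intro x hxa hxb
    simp [zGroup, List.mem_filter] at hxa hxb
    omega

lemma zOrder_mem {c n R : Nat} (h2 : 2 ≤ R) (hc : c = 2 * (R - 1)) (x : Nat) :
    x ∈ zOrder c n R ↔ x < n := by
  constructor
  · intro hx
    rw [zOrder, List.mem_flatMap] at hx
    obtain ⟨r, _, hxr⟩ := hx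
    simp [zGroup, List.mem_filter] at hxr
    exact hxr.1
  · intro hx
    rw [zOrder, List.mem_flatMap]
    exact ⟨zPat c x, List.mem_range.2 (hc ▸ zPat_lt h2 x), by simp [zGroup, List.mem_filter, hx]⟩

lemma zSig_lt {c n R : Nat} (h2 : 2 ≤ R) (hc : c = 2 * (R - 1)) (i : Nat) (hi : i < n) :
    zSig c n i < n := by
  obtain ⟨h, _⟩ := zOrder_getElem (n := n) h2 hc i hi
  rwa [zOrder_length_eq_off, zOff_top h2 hc] at h


-- one ciphertext row, as a segment of the cipher text
def zChunk (cs : List Char) (c n r : Nat) : List Char :=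
  (cs.drop (zOff c n r)).take (zCnt c n r)

lemma zChunk_length (cs : List Char) (c n r : Nat) (hn : n = cs.length) :
    (zChunk cs c n r).length = zCnt c n r := by
  have := zOff_cnt_le c n r
  simp [zChunk]; omega

lemma succ_mod (c t : Nat) (hc : 2 ≤ c) :
    (t + 1) % c = if t % c + 1 = c then 0 else t % c + 1 := by
  rw [← Nat.mod_add_mod]
  have hlt : t % c < c := Nat.mod_lt _ (by omega)
  by_cases h : t % c + 1 = c
  · simp [h, Nat.mod_self]
  · rw [Nat.mod_eq_of_lt (by omega)]
    simp [h]

lemma count_fold (R : Nat) (f : Nat → Nat) (hf : ∀ i, f i < R) (t : Nat) :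
    (List.range t).foldl (fun rl i => rl.set (f i) (rl.getD (f i) 0 + 1)) (List.replicate R (0:Int))
      = (List.range R).map (fun r => (((List.range t).filter (fun i => f i = r)).length : Int)) := by
  induction t with
  | zero =>
    apply List.ext_getElem
    · simp
    · intro r h1 h2
      simp
  | succ t ih =>
    rw [List.range_succ, List.foldl_append, ih]
    simp only [List.foldl_cons, List.foldl_nil]
    have hgetD : ((List.range R).map
        (fun r => (((List.range t).filter (fun i => f i = r)).length : Int))).getD (f t) 0
        = (((List.range t).filter (fun i => f i = f t)).length : Int) := by
      rw [List.getD_eq_getElem?_getD, List.getElem?_map, List.getElem?_range (hf t)]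
      simp
    rw [hgetD]
    apply List.ext_getElem
    · simp
    · intro r h1 h2
      rw [List.getElem_set]
      simp only [List.getElem_map, List.getElem_range]
      by_cases h : f t = r <;> simp [List.filter_append, h] <;> push_cast <;> omega

lemma fence_fold (cs : List Char) (c n R : Nat) :
    ((List.range R).map (fun r => (zCnt c n r : Int))).foldl
      (fun (p : List (List Char) × Int) len =>
        (p.1 ++ [PySem.List.slice cs (some p.2) (some (p.2 + len))], p.2 + len))
      ([], 0)
    = ((List.range R).map (zChunk cs c n), ((zOff c n R : Nat) : Int)) := by
  induction R with
  | zero => simp [zOff_zero]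
  | succ r ih =>
    rw [List.range_succ, List.map_append, List.foldl_append, ih]
    simp only [List.map_append, List.foldl_cons, List.foldl_nil, List.map_cons, List.map_nil]
    rw [PySem.List.slice_natCast_add]
    have hoff : ((zOff c n r : Nat) : Int) + ((zCnt c n r : Nat) : Int) = ((zOff c n (r+1) : Nat) : Int) := by
      push_cast [zOff_succ]; ring
    rw [hoff]
    rfl


lemma foldl_ignore_iterate {α β : Type} (g : β → β) (l : List α) (init : β) :
    l.foldl (fun s _ => g s) init = g^[l.length] init := by
  induction l generalizing init with
  | nil => rfl
  | cons x xs ih => simp [Function.iterate_succ_apply, ih]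

lemma read_iter (cs : List Char) (R c n : Nat) (h2 : 2 ≤ R) (hc : c = 2 * (R - 1))
    (hn : n = cs.length) (hRn : R < n) :
    ∀ t, t ≤ n →
    (pvReadStep (R : Int))^[t] (some ([], (List.range R).map (zChunk cs c n), 0, 1))
      = some ((List.range t).map (fun i => cs.getD (zSig c n i) ' '),
              (List.range R).map (fun r =>
                (zChunk cs c n r).drop (((List.range t).filter (fun j => zPat c j = r)).length)),
              ((zPat c t : Nat) : Int),
              if t % c < R - 1 then (1 : Int) else -1) := by
  have hcc : 2 ≤ c := by omega
  intro t ht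
  induction t with
  | zero =>
    have hp0 : zPat c 0 = 0 := by
      unfold zPat
      have : 0 % c = 0 := Nat.zero_mod c
      omega
    simp [hp0, show 0 % c = 0 from Nat.zero_mod c, show 0 < R - 1 by omega]
  | succ t ihr =>
    have htn : t < n := by omega
    rw [Function.iterate_succ_apply', ihr (by omega)]
    have hplt : zPat c t < R := hc ▸ zPat_lt h2 t
    have ha : t % c < c := Nat.mod_lt _ (by omega)
    -- the row popped from
    set p := zPat c t with hp
    set b := ((List.range t).filter (fun j => zPat c j = p)).length with hbdef
    have hbB : b = zBefore c t := rfl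
    have hblt : b < (zChunk cs c n p).length := by
      rw [zChunk_length cs c n p hn, hbB, hp]
      exact zBefore_lt_zCnt t htn
    have hget : PySem.List.pyGet? ((List.range R).map (fun r =>
        (zChunk cs c n r).drop (((List.range t).filter (fun j => zPat c j = r)).length)))
        ((p : Nat) : Int) = some ((zChunk cs c n p).drop b) := by
      rw [PySem.List.pyGet?_natCast, List.getElem?_map, List.getElem?_range hplt]
      rfl
    have hrow : (zChunk cs c n p).drop b
        = (zChunk cs c n p)[b] :: (zChunk cs c n p).drop (b + 1) :=
      List.drop_eq_getElem_cons hblt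
    have hsig : zSig c n t < cs.length := hn ▸ zSig_lt h2 hc t htn
    have hchar : (zChunk cs c n p)[b]'hblt = cs[zSig c n t]'hsig := by
      simp only [zChunk, List.getElem_take, List.getElem_drop]
      rfl
    simp only [pvReadStep, hget]
    rw [hrow]
    rw [PySem.List.pop?_zero_cons]
    simp only []
    refine congrArg some ?_
    refine Prod.ext ?_ (Prod.ext ?_ (Prod.ext ?_ ?_))
    · -- result component
      simp only [List.range_succ, List.map_append, List.map_cons, List.map_nil]
      congr 1
      rw [List.getD_eq_getElem _ _ hsig, hchar]
    · -- fence component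
      rw [PySem.List.pySetD_natCast]
      apply List.ext_getElem
      · simp
      · intro r h1 h2'
        simp only [List.length_map, List.length_range] at h1
        rw [List.getElem_set]
        simp only [List.getElem_map, List.getElem_range]
        have hstep : ((List.range (t+1)).filter (fun j => zPat c j = r)).length
            = ((List.range t).filter (fun j => zPat c j = r)).length
              + (if zPat c t = r then 1 else 0) := by
          rw [List.range_succ, List.filter_append]
          by_cases h : zPat c t = r <;> simp [h]
        by_cases h : p = r
        · have hzr : zPat c t = r := by rw [← hp]; exact h
          subst h
          rw [if_pos rfl, hstep, if_pos hzr, ← hbdef]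
        · have hzr : ¬ zPat c t = r := by rw [← hp]; exact h
          rw [if_neg h, hstep, if_neg hzr, Nat.add_zero]
    · -- rail component
      have ha' := succ_mod c t hcc
      rcases eq_or_ne (t % c + 1) c with hend | hend
      · rw [if_pos hend] at ha'
        simp only [hp, zPat]
        split_ifs <;> omega
      · rw [if_neg hend] at ha'
        simp only [hp, zPat]
        split_ifs <;> omega
    · -- direction component
      have ha' := succ_mod c t hcc
      rcases eq_or_ne (t % c + 1) c with hend | hend
      · rw [if_pos hend] at ha'
        simp only [hp, zPat]
        split_ifs <;> omega
      · rw [if_neg hend] at ha'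
        simp only [hp, zPat]
        split_ifs <;> omega


lemma scatter_length {α β : Type} (g : α → β) :
    ∀ (cs : List α) (ord : List Nat) (init : List β),
      ((cs.zip ord).foldl (fun pl p => pl.set p.2 (g p.1)) init).length = init.length := by
  intro cs
  induction cs with
  | nil => intro ord init; simp
  | cons x xs ih =>
    intro ord init
    cases ord with
    | nil => simp
    | cons o ord' =>
      simp only [List.zip_cons_cons, List.foldl_cons]
      rw [ih ord' (init.set o (g x))]
      simp

lemma scatter_untouched {α β : Type} (g : α → β) (dflt : β) :
    ∀ (cs : List α) (ord : List Nat) (init : List β) (k : Nat), k ∉ ord →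
      ((cs.zip ord).foldl (fun pl p => pl.set p.2 (g p.1)) init).getD k dflt
        = init.getD k dflt := by
  intro cs
  induction cs with
  | nil => intro ord init k _; simp
  | cons x xs ih =>
    intro ord init k hk
    cases ord with
    | nil => simp
    | cons o ord' =>
      simp only [List.zip_cons_cons, List.foldl_cons]
      rw [ih ord' (init.set o (g x)) k (by intro h; exact hk (List.mem_cons_of_mem _ h))]
      have hne : o ≠ k := by intro h; exact hk (h ▸ List.mem_cons_self ..)
      simp [List.getD_eq_getElem?_getD, List.getElem?_set_ne hne]

lemma scatter_get {α β : Type} (g : α → β) (dflt : β) :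
    ∀ (cs : List α) (ord : List Nat) (init : List β), ord.Nodup →
      (∀ x ∈ ord, x < init.length) →
      ∀ (j : Nat) (hj : j < cs.length) (hjo : j < ord.length),
      ((cs.zip ord).foldl (fun pl p => pl.set p.2 (g p.1)) init).getD (ord[j]) dflt
        = g cs[j] := by
  intro cs
  induction cs with
  | nil => intro ord init _ _ j hj _; simp at hj
  | cons x xs ih =>
    intro ord init hnd hin j hj hjo
    cases ord with
    | nil => simp at hjo
    | cons o ord' =>
      simp only [List.zip_cons_cons, List.foldl_cons]
      cases j with
      | zero =>
        simp only [List.getElem_cons_zero]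
        rw [scatter_untouched g dflt xs ord' (init.set o (g x)) o (List.nodup_cons.1 hnd).1]
        have ho : o < init.length := hin o (List.mem_cons_self ..)
        rw [List.getD_eq_getElem _ _ (by simpa using ho), List.getElem_set_self]
      | succ j' =>
        simp only [List.getElem_cons_succ]
        exact ih ord' (init.set o (g x)) (List.nodup_cons.1 hnd).2
          (by intro y hy; simpa using hin y (List.mem_cons_of_mem _ hy))
          j' (by simpa using hj) (by simpa using hjo)

lemma pattern_eq (R c n : Nat) (h2 : 2 ≤ R) (hcR : c = 2 * (R - 1)) :
    (PySem.List.pyRange 0 (n : Int) 1).map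
        (fun i => min (PySem.Int.mod i (c : Int)) ((c : Int) - PySem.Int.mod i (c : Int)))
      = (List.range n).map (fun i => ((zPat c i : Nat) : Int)) := by
  rw [PySem.List.pyRange_zero_natCast, List.map_map]
  apply List.map_congr_left
  intro i _
  have hm : i % c < c := Nat.mod_lt _ (by omega)
  simp only [Function.comp_apply, PySem.Int.mod_natCast, zPat]
  omega

lemma bucket_fold (R : Nat) (f : Nat → Nat) (hf : ∀ i, f i < R) (t : Nat) :
    (List.range t).foldl (fun rows i => rows.set (f i) (rows.getD (f i) [] ++ [((i : Nat) : Int)]))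
      (List.replicate R ([] : List Int))
    = (List.range R).map (fun r =>
        ((List.range t).filter (fun i => f i = r)).map (fun x => ((x : Nat) : Int))) := by
  induction t with
  | zero =>
    apply List.ext_getElem
    · simp
    · intro r h1 h2
      simp
  | succ t ih =>
    rw [List.range_succ, List.foldl_append, ih]
    simp only [List.foldl_cons, List.foldl_nil]
    have hgetD : ((List.range R).map (fun r =>
        ((List.range t).filter (fun i => f i = r)).map (fun x => ((x : Nat) : Int)))).getD (f t) []
        = ((List.range t).filter (fun i => f i = f t)).map (fun x => ((x : Nat) : Int)) := by
      rw [List.getD_eq_getElem?_getD, List.getElem?_map, List.getElem?_range (hf t)]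
      simp
    rw [hgetD]
    apply List.ext_getElem
    · simp
    · intro r h1 h2
      rw [List.getElem_set]
      simp only [List.getElem_map, List.getElem_range]
      by_cases h : f t = r <;> simp [List.filter_append, h]

lemma join_empty_singletons (l : List Char) :
    PySem.Str.join "" (l.map String.singleton) = String.ofList l := by
  simp only [PySem.Str.join, List.map_map]
  have h1 : (String.toList ∘ String.singleton) = fun c => [c] := by
    funext c; simp
  have h2 : String.toList "" = [] := rfl
  rw [h1, h2, PySem.Chars.join_nil_singletons]

lemma fence_alt_eq (text : String) (rails : Int) (R c n : Nat)
    (hR : rails = (R : Int)) (h2 : 2 ≤ R) (hc : c = 2 * (R - 1))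
    (hn : n = text.toList.length) (hRn : R < n) :
    pvFenceDecrypt text rails
      = String.ofList ((List.range n).map (fun i => text.toList.getD (zSig c n i) ' ')) := by
  subst hR
  have hlen : PySem.Str.len text = (n : Int) := by rw [PySem.Str.len_eq, hn]
  have hcyc : 2 * ((R : Int) - 1) = (c : Int) := by push_cast [hc]; omega
  have hordlen : (zOrder c n R).length = n := by
    rw [zOrder_length_eq_off, zOff_top h2 hc]
  simp only [pvFenceDecrypt, hlen, hcyc]
  rw [if_neg (by exact_mod_cast Nat.not_le.2 hRn)]
  rw [pattern_eq R c n h2 hc]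
  simp only [PySem.List.pyRange_zero_natCast, List.foldl_map, List.map_map,
    PySem.List.pyRepeat_singleton, Int.toNat_natCast]
  have hinit : List.map ((fun (_ : Int) => ([] : List Int)) ∘ fun (k : Nat) => ((k : Nat) : Int))
      (List.range R) = List.replicate R ([] : List Int) := by
    apply List.ext_getElem
    · simp
    · intro r hr1 hr2
      simp
  rw [hinit]
  have hrows : List.foldl
      (fun (x : List (List Int)) (y : Nat) => PySem.List.pySetD x
        (PySem.List.pyGetD (List.map (fun i => ((zPat c i : Nat) : Int)) (List.range n)) (↑y) 0)
        (PySem.List.pyGetD x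
          (PySem.List.pyGetD (List.map (fun i => ((zPat c i : Nat) : Int)) (List.range n)) (↑y) 0) []
          ++ [(↑y : Int)]))
      (List.replicate R ([] : List Int)) (List.range n)
      = (List.range R).map (fun r =>
          ((List.range n).filter (fun i => zPat c i = r)).map (fun x => ((x : Nat) : Int))) := by
    refine Eq.trans (PySem.List.foldl_congr_mem _ _
      (fun (rows : List (List Int)) (i : Nat) =>
        rows.set (zPat c i) (rows.getD (zPat c i) [] ++ [((i : Nat) : Int)])) _ ?_)
      (bucket_fold R (zPat c) (fun i => by rw [hc]; exact zPat_lt h2 i) n)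
    intro acc x hx
    have hxn : x < n := List.mem_range.1 hx
    have hpg : PySem.List.pyGetD (List.map (fun i => ((zPat c i : Nat) : Int)) (List.range n)) (↑x) 0
        = ((zPat c x : Nat) : Int) := by
      rw [PySem.List.pyGetD_natCast, List.getD_eq_getElem _ _ (by simpa using hxn)]
      simp
    rw [hpg, PySem.List.pySetD_natCast, PySem.List.pyGetD_natCast]
  rw [hrows]
  have horder : List.flatMap (fun row => row) ((List.range R).map (fun r =>
        ((List.range n).filter (fun i => zPat c i = r)).map (fun x => ((x : Nat) : Int))))
      = (zOrder c n R).map (fun x => ((x : Nat) : Int)) := by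
    rw [List.flatMap_map, zOrder, List.map_flatMap]
    rfl
  rw [horder]
  rw [List.zip_map_right, List.foldl_map]
  simp only [Prod.map, id_eq, PySem.List.pySetD_natCast]
  have hplain : (text.toList.zip (zOrder c n R)).foldl
        (fun pl p => pl.set p.2 (String.singleton p.1)) (List.replicate n "")
      = (List.range n).map (fun i => String.singleton (text.toList.getD (zSig c n i) ' ')) := by
    apply List.ext_getElem
    · rw [scatter_length]; simp
    · intro i h1 h2'
      have hi : i < n := by
        have h1' := h1
        rwa [scatter_length, List.length_replicate] at h1'
      obtain ⟨hjlt, hje⟩ := zOrder_getElem h2 hc i hi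
      have hsig : zSig c n i < text.toList.length := hn ▸ zSig_lt h2 hc i hi
      have hget := scatter_get String.singleton "" text.toList (zOrder c n R)
        (List.replicate n "") (zOrder_nodup c n R)
        (by intro x hx; simp [List.length_replicate, (zOrder_mem h2 hc x).1 hx])
        (zSig c n i) hsig (by omega)
      rw [hje] at hget
      rw [← List.getD_eq_getElem _ "" h1, hget]
      simp only [List.getElem_map, List.getElem_range]
      rw [List.getD_eq_getElem _ _ hsig]
  rw [hplain]
  have hcomp : (fun i => String.singleton (text.toList.getD (zSig c n i) ' '))
      = String.singleton ∘ (fun i => text.toList.getD (zSig c n i) ' ') := rfl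
  rw [hcomp, ← List.map_map, join_empty_singletons]

lemma decrypt_eq (text : String) (rails : Int) (h2 : 2 ≤ rails)
    (hle : rails ≤ PySem.Str.len text) :
    pvDecryptA text rails = some (pvFenceDecrypt text rails) := by
  obtain ⟨R, hR⟩ : ∃ R : Nat, rails = (R : Int) :=
    ⟨rails.toNat, (Int.toNat_of_nonneg (by omega)).symm⟩
  subst hR
  have h2R : 2 ≤ R := by exact_mod_cast h2
  rw [PySem.Str.len_eq] at hle
  rcases eq_or_lt_of_le hle with heq | hlt
  · -- rails = len(text): both sides return the text unchanged
    simp only [pvDecryptA, pvFenceDecrypt, PySem.Str.len_eq]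
    rw [if_neg (by omega), if_neg (by omega), if_pos (by omega), if_pos (by omega)]
  · -- 2 ≤ rails < len(text): the real computation
    have hRn : R < text.toList.length := by exact_mod_cast hlt
    simp only [pvDecryptA, PySem.Str.len_eq]
    rw [if_neg (by omega), if_neg (by omega), if_neg (by push_cast; omega)]
    set c := 2 * (R - 1) with hcdef
    have hcyc : 2 * ((R : Int) - 1) = (c : Int) := by push_cast [hcdef]; omega
    simp only [hcyc, PySem.List.pyRange_zero_natCast, PySem.List.pyRepeat_singleton,
      Int.toNat_natCast, List.foldl_map]
    have hrows : List.foldl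
        (fun (x : List Int) (y : Nat) => PySem.List.pySetD x
          (if (R:Int) ≤ PySem.Int.mod ↑y ↑c then ↑c - PySem.Int.mod ↑y ↑c else PySem.Int.mod ↑y ↑c)
          (PySem.List.pyGetD x
            (if (R:Int) ≤ PySem.Int.mod ↑y ↑c then ↑c - PySem.Int.mod ↑y ↑c else PySem.Int.mod ↑y ↑c) 0 + 1))
        (List.replicate R (0:Int)) (List.range text.toList.length)
        = (List.range R).map (fun r => ((zCnt c text.toList.length r : Nat) : Int)) := by
      refine Eq.trans (Eq.trans (PySem.List.foldl_congr_mem _ _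
        (fun (rl : List Int) (i : Nat) => rl.set (zPat c i) (rl.getD (zPat c i) 0 + 1)) _ ?_)
        (count_fold R (zPat c) (fun i => by rw [hcdef]; exact zPat_lt h2R i) text.toList.length)) rfl
      intro acc x _
      have hm : x % c < c := Nat.mod_lt _ (by rw [hcdef]; omega)
      have hpos : (if (R:Int) ≤ PySem.Int.mod ↑x ↑c then ↑c - PySem.Int.mod ↑x ↑c
          else PySem.Int.mod ↑x ↑c) = ((zPat c x : Nat) : Int) := by
        simp only [PySem.Int.mod_natCast, zPat]
        split_ifs <;> omega
      rw [hpos, PySem.List.pySetD_natCast, PySem.List.pyGetD_natCast]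
    rw [hrows]
    simp only [fence_fold]
    rw [foldl_ignore_iterate (pvReadStep (R:Int)), List.length_range]
    rw [read_iter text.toList R c text.toList.length h2R hcdef rfl hRn text.toList.length (le_refl _)]
    rw [fence_alt_eq text (R:Int) R c text.toList.length rfl h2R hcdef rfl hRn]
    rfl

-- ===== VERDICT (by name: the statement is the Claim_ definition above) =====
theorem brute_force_decrypt_spec : Claim_equal_brute_force_decrypt := by
  intro text max_rails _
  unfold Spec_brute_force_decrypt
  simp only [brute_force_decrypt, brute_force_decrypt_alt]
  have hmin : min (max_rails + 1) (PySem.Str.len text + 1)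
      = min max_rails (PySem.Str.len text) + 1 := by omega
  rw [hmin]
  have hdec : ∀ r ∈ PySem.List.pyRange 2 (min max_rails (PySem.Str.len text) + 1) 1,
      pvDecryptA text r = some (pvFenceDecrypt text r) := by
    intro r hr
    rw [PySem.List.mem_pyRange_one] at hr
    exact decrypt_eq text r hr.1 (by omega)
  have hfold : ∀ (l : List Int),
      (∀ r ∈ l, pvDecryptA text r = some (pvFenceDecrypt text r)) →
      ∀ (d : PySem.Dict Int String),
      l.foldl (fun (p : PySem.Dict Int String × Bool) rails =>
          if p.2 then p
          else
            match pvDecryptA text rails with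
            | none => (p.1, true)
            | some r => (p.1.insert rails r, false)) (d, false)
        = (l.foldl (fun d rails => d.insert rails (pvFenceDecrypt text rails)) d, false) := by
    intro l
    induction l with
    | nil => intro _ d; rfl
    | cons x xs ih =>
      intro h d
      simp only [List.foldl_cons, h x (List.mem_cons_self ..)]
      exact ih (fun r hr => h r (List.mem_cons_of_mem _ hr)) _
  refine Eq.trans (congrArg (fun q => q.1.items)
    (hfold (PySem.List.pyRange 2 (min max_rails (PySem.Str.len text) + 1) 1) hdec
      PySem.Dict.empty)) ?_
  rw [PySem.Dict.items_foldl_insert_fresh _ (fun r => r) (fun r => pvFenceDecrypt text r) _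
    (by intro a _; rfl) (by simpa using PySem.List.nodup_pyRange_one 2 (min max_rails (PySem.Str.len text) + 1))]
  rfl
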